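-- pv_equiv track=rewrite | github.com/AnaBrade/spoj | Coins/coins.py | exchange_coin
-- ===== SOURCE A (Python) =====
-- cache = {}
--
-- def exchange_coin(coin):
--
--     if coin not in cache:
--         if coin > 11:
--             value1 = exchange_coin(coin//2)
--             value2 = exchange_coin(coin//3)
--             value3 = exchange_coin(coin//4)
--
--             if (value1+value2+value3) > coin:
--                 cache[coin] = value1 + value2 + value3
--                 return value1 + value2 + value3
--             else:
--                 cache[coin] = coin
--                 return coin
--         else:
--             cache[coin] = coin
--             return coin
--     else:
--         return cache[coin]
-- ===== SOURCE B (Python) =====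
-- def exchange_coin(coin):
--     if coin <= 11:
--         return coin
--     # every subproblem reachable from coin is coin // (2**a * 3**b)
--     n = coin.bit_length()
--     vals = sorted({coin // (2 ** a * 3 ** b) for a in range(n + 1) for b in range(n + 1)})
--     best = {}
--     for v in vals:
--         if v <= 11:
--             best[v] = v
--         else:
--             best[v] = max(v, best[v // 2] + best[v // 3] + best[v // 4])
--     return best[coin]
-- ===== Notes on version B (the rewrite author's own statement) =====
-- stated objective: alternative
-- what changed: Replaces top-down recursion with a global memo dict by a closed-form enumeration of the whole subproblem set {coin // (2^a * 3^b)} followed by a single bottom-up pass over the sorted distinct values.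
import Mathlib
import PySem

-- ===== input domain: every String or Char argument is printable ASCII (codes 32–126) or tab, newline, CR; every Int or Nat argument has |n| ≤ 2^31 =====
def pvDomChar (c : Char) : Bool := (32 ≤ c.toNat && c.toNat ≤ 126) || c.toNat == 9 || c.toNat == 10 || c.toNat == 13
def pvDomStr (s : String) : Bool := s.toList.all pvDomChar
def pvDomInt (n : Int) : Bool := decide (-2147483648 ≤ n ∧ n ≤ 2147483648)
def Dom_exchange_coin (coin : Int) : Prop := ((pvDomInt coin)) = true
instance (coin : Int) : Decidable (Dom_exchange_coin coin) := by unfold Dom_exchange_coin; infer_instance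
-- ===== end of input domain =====

-- B replaces A's globally-memoized top-down recursion by a closed-form enumeration of the
-- subproblem set {coin // (2^a * 3^b)} and one bottom-up pass over its sorted values
-- (alternative algorithm, similar cost); A's global cache only affects performance, never
-- the returned value, so A is ported with the cache threaded as state, fresh per top-level call.


-- ===== PORT A =====
-- A's recursion with the global `cache` dict threaded through as explicit state
-- (the `coin not in cache` test and the `cache[coin] = …` stores are the match/inserts below).
-- The `fuel` argument only makes the recursion structural (coin.toNat + 1 always suffices,
-- proved below); the fuel-0 branch is never reached.
def exchangeGoA (fuel : Nat) (coin : Int) (cache : PySem.Dict Int Int) : Int × PySem.Dict Int Int :=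
  match fuel with
  | 0 => (coin, cache)
  | fuel + 1 =>
    match cache.get? coin with
    | some v => (v, cache)                       -- `return cache[coin]`
    | none =>
      if coin > 11 then
        let r1 := exchangeGoA fuel (PySem.Int.floordiv coin 2) cache
        let r2 := exchangeGoA fuel (PySem.Int.floordiv coin 3) r1.2
        let r3 := exchangeGoA fuel (PySem.Int.floordiv coin 4) r2.2
        if r1.1 + r2.1 + r3.1 > coin then
          (r1.1 + r2.1 + r3.1, r3.2.insert coin (r1.1 + r2.1 + r3.1))
        else
          (coin, r3.2.insert coin coin)
      else
        (coin, cache.insert coin coin)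

def exchange_coin (coin : Int) : Int := (exchangeGoA (coin.toNat + 1) coin PySem.Dict.empty).1

-- ===== PORT B =====
-- sorted({coin // (2**a * 3**b) for a in range(n+1) for b in range(n+1)}), n = coin.bit_length()
def exchangeVals (coin : Int) : List Int :=
  PySem.List.sorted
    (PySem.Set.ofList
      ((List.range (PySem.Int.bitLength coin + 1)).flatMap (fun a =>
        (List.range (PySem.Int.bitLength coin + 1)).map (fun b =>
          PySem.Int.floordiv coin ((2 : Int) ^ a * (3 : Int) ^ b)))))
    (fun x => x) false

-- Python's `best[k]` is ported as `getD k 0`: exact here because every looked-up key is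
-- already present in `best` when it is read (proved below).
def exchange_coin_alt (coin : Int) : Int :=
  if coin ≤ 11 then coin
  else
    let best := (exchangeVals coin).foldl
      (fun best v =>
        if v ≤ 11 then best.insert v v
        else best.insert v (max v
          (best.getD (PySem.Int.floordiv v 2) 0 +
           best.getD (PySem.Int.floordiv v 3) 0 +
           best.getD (PySem.Int.floordiv v 4) 0)))
      PySem.Dict.empty
    best.getD coin 0

-- ===== PRECONDITION & SPEC =====
def Spec_exchange_coin (coin : Int) (out : Int) : Prop := out = exchange_coin_alt coin
instance (coin : Int) (out : Int) : Decidable (Spec_exchange_coin coin out) := by unfold Spec_exchange_coin; infer_instance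

-- ===== CLAIM (what is proved, stated in full; the proofs are below) =====
def Claim_equal_exchange_coin : Prop := ∀ (coin : Int), Dom_exchange_coin coin → Spec_exchange_coin coin (exchange_coin coin)

-- ===== LEMMAS AND PROOFS =====

-- termination lemmas for the recurrence pvH and the fuel bound
theorem pvFloorLt2 (coin : Int) (h : 11 < coin) :
    (PySem.Int.floordiv coin 2).toNat < coin.toNat := by
  rw [PySem.Int.floordiv_eq_ediv_of_pos (by norm_num)]; omega

theorem pvFloorLt3 (coin : Int) (h : 11 < coin) :
    (PySem.Int.floordiv coin 3).toNat < coin.toNat := by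
  rw [PySem.Int.floordiv_eq_ediv_of_pos (by norm_num)]; omega

theorem pvFloorLt4 (coin : Int) (h : 11 < coin) :
    (PySem.Int.floordiv coin 4).toNat < coin.toNat := by
  rw [PySem.Int.floordiv_eq_ediv_of_pos (by norm_num)]; omega

-- the mathematical recurrence both programs compute
def pvH (coin : Int) : Int :=
  if h : coin ≤ 11 then coin
  else max coin
    (pvH (PySem.Int.floordiv coin 2) + pvH (PySem.Int.floordiv coin 3) +
     pvH (PySem.Int.floordiv coin 4))
termination_by coin.toNat
decreasing_by
  · exact pvFloorLt2 coin (not_le.mp h)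
  · exact pvFloorLt3 coin (not_le.mp h)
  · exact pvFloorLt4 coin (not_le.mp h)

theorem pvH_le (coin : Int) (h : coin ≤ 11) : pvH coin = coin := by
  rw [pvH]; simp [h]

theorem pvH_gt (coin : Int) (h : ¬ coin ≤ 11) :
    pvH coin = max coin
      (pvH (PySem.Int.floordiv coin 2) + pvH (PySem.Int.floordiv coin 3) +
       pvH (PySem.Int.floordiv coin 4)) := by
  rw [pvH]; simp [h]

-- ---- A = pvH ----
def pvInv (d : PySem.Dict Int Int) : Prop := ∀ u w, d.get? u = some w → w = pvH u

theorem pvInv_insert (d : PySem.Dict Int Int) (x : Int) (hd : pvInv d) :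
    pvInv (d.insert x (pvH x)) := by
  intro u w hw
  rw [PySem.Dict.get?_insert] at hw
  split at hw
  · next heq => cases hw; rw [heq]
  · exact hd _ _ hw

theorem pvInv_empty : pvInv PySem.Dict.empty := by
  intro u w h
  simp [PySem.Dict.get?_empty] at h

theorem exchangeGoA_spec (fuel : Nat) (coin : Int) (hfuel : coin.toNat < fuel)
    (d : PySem.Dict Int Int) (hd : pvInv d) :
    (exchangeGoA fuel coin d).1 = pvH coin ∧ pvInv (exchangeGoA fuel coin d).2 := by
  induction fuel generalizing coin d with
  | zero => omega
  | succ fuel ih =>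
    simp only [exchangeGoA]
    cases hget : d.get? coin with
    | some v =>
      exact ⟨hd _ _ hget, hd⟩
    | none =>
      dsimp only
      split_ifs with h hgtsum
      · -- coin > 11, value1+value2+value3 > coin
        have H1 := ih (PySem.Int.floordiv coin 2) (by have := pvFloorLt2 coin h; omega) d hd
        have H2 := ih (PySem.Int.floordiv coin 3) (by have := pvFloorLt3 coin h; omega)
          (exchangeGoA fuel (PySem.Int.floordiv coin 2) d).2 H1.2
        have H3 := ih (PySem.Int.floordiv coin 4) (by have := pvFloorLt4 coin h; omega)
          (exchangeGoA fuel (PySem.Int.floordiv coin 3) (exchangeGoA fuel (PySem.Int.floordiv coin 2) d).2).2 H2.2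
        rw [H1.1, H2.1, H3.1] at hgtsum
        have hS : (exchangeGoA fuel (PySem.Int.floordiv coin 2) d).1 +
            (exchangeGoA fuel (PySem.Int.floordiv coin 3) (exchangeGoA fuel (PySem.Int.floordiv coin 2) d).2).1 +
            (exchangeGoA fuel (PySem.Int.floordiv coin 4)
              (exchangeGoA fuel (PySem.Int.floordiv coin 3) (exchangeGoA fuel (PySem.Int.floordiv coin 2) d).2).2).1
            = pvH coin := by
          rw [H1.1, H2.1, H3.1, pvH_gt coin (by omega)]; omega
        refine ⟨hS, ?_⟩
        show pvInv (_root_.PySem.Dict.insert _ coin _)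
        rw [hS]
        exact pvInv_insert _ _ H3.2
      · -- coin > 11, sum ≤ coin : result is coin = pvH coin
        have H1 := ih (PySem.Int.floordiv coin 2) (by have := pvFloorLt2 coin h; omega) d hd
        have H2 := ih (PySem.Int.floordiv coin 3) (by have := pvFloorLt3 coin h; omega)
          (exchangeGoA fuel (PySem.Int.floordiv coin 2) d).2 H1.2
        have H3 := ih (PySem.Int.floordiv coin 4) (by have := pvFloorLt4 coin h; omega)
          (exchangeGoA fuel (PySem.Int.floordiv coin 3) (exchangeGoA fuel (PySem.Int.floordiv coin 2) d).2).2 H2.2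
        rw [H1.1, H2.1, H3.1] at hgtsum
        have hcoin : pvH coin = coin := by
          rw [pvH_gt coin (by omega)]; omega
        refine ⟨hcoin.symm, ?_⟩
        have hins := pvInv_insert _ coin H3.2
        rw [hcoin] at hins
        exact hins
      · -- coin ≤ 11
        have hcoin : pvH coin = coin := pvH_le coin (by omega)
        refine ⟨hcoin.symm, ?_⟩
        have hins := pvInv_insert d coin hd
        rw [hcoin] at hins
        exact hins

-- ---- B = pvH ----
theorem vals_mem_iff (coin v : Int) :
    v ∈ exchangeVals coin ↔ ∃ a b : Nat, a ≤ PySem.Int.bitLength coin ∧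
      b ≤ PySem.Int.bitLength coin ∧ v = PySem.Int.floordiv coin ((2:Int)^a * (3:Int)^b) := by
  unfold exchangeVals
  simp only [PySem.List.mem_sorted, PySem.Set.mem_ofList, List.mem_flatMap, List.mem_map,
    List.mem_range]
  constructor
  · rintro ⟨a, ha, b, hb, hv⟩
    exact ⟨a, b, by omega, by omega, hv.symm⟩
  · rintro ⟨a, b, ha, hb, rfl⟩
    exact ⟨a, by omega, b, by omega, rfl⟩

theorem vals_self (coin : Int) : coin ∈ exchangeVals coin := by
  refine (vals_mem_iff coin coin).2 ⟨0, 0, Nat.zero_le _, Nat.zero_le _, ?_⟩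
  rw [show (2:Int)^0 * 3^0 = 1 by norm_num,
    PySem.Int.floordiv_eq_ediv_of_pos (by norm_num), Int.ediv_one]

theorem vals_closed (coin v : Int) (hc : 11 < coin) (hv : v ∈ exchangeVals coin)
    (h12 : 12 ≤ v) :
    PySem.Int.floordiv v 2 ∈ exchangeVals coin ∧
    PySem.Int.floordiv v 3 ∈ exchangeVals coin ∧
    PySem.Int.floordiv v 4 ∈ exchangeVals coin := by
  obtain ⟨a, b, ha, hb, rfl⟩ := (vals_mem_iff coin v).1 hv
  obtain ⟨m, rfl⟩ : ∃ m : Nat, coin = (m : Int) := ⟨coin.toNat, by omega⟩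
  have hdiv : ((2:Int)^a * 3^b) = ((2^a * 3^b : Nat) : Int) := by push_cast; ring
  rw [hdiv, PySem.Int.floordiv_natCast] at h12 ⊢
  have hpos : 0 < 2^a * 3^b := by positivity
  have h12n : 12 ≤ m / (2^a * 3^b) := by exact_mod_cast h12
  have h12' : 12 * (2^a * 3^b) ≤ m :=
    le_trans (Nat.mul_le_mul_right _ h12n) (Nat.div_mul_le_self _ _)
  have hmlt : m < 2 ^ PySem.Int.bitLength (m : Int) := by
    have := PySem.Int.lt_two_pow_bitLength (m : Int)
    simpa using this
  have hexp2 : ∀ e : Nat, 2^e ≤ m → e < PySem.Int.bitLength (m : Int) := by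
    intro e he
    exact (Nat.pow_lt_pow_iff_right (by norm_num)).1 (lt_of_le_of_lt he hmlt)
  have hexp3 : ∀ e : Nat, 3^e ≤ m → e < PySem.Int.bitLength (m : Int) := by
    intro e he
    have h23 : (2:Nat) ^ PySem.Int.bitLength (m : Int) ≤ 3 ^ PySem.Int.bitLength (m : Int) :=
      Nat.pow_le_pow_left (by norm_num) _
    exact (Nat.pow_lt_pow_iff_right (by norm_num)).1
      (lt_of_le_of_lt he (lt_of_lt_of_le hmlt h23))
  have ha1 : 1 ≤ 2^a := Nat.one_le_pow _ _ (by norm_num)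
  have hb1 : 1 ≤ 3^b := Nat.one_le_pow _ _ (by norm_num)
  have ka1 : a + 1 < PySem.Int.bitLength (m : Int) := by
    refine hexp2 (a+1) (le_trans ?_ h12')
    calc 2^(a+1) = 2 * 2^a := by ring
      _ ≤ 12 * (2^a * 3^b) := by nlinarith
  have ka2 : a + 2 < PySem.Int.bitLength (m : Int) := by
    refine hexp2 (a+2) (le_trans ?_ h12')
    calc 2^(a+2) = 4 * 2^a := by ring
      _ ≤ 12 * (2^a * 3^b) := by nlinarith
  have kb1 : b + 1 < PySem.Int.bitLength (m : Int) := by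
    refine hexp3 (b+1) (le_trans ?_ h12')
    calc 3^(b+1) = 3 * 3^b := by ring
      _ ≤ 12 * (2^a * 3^b) := by nlinarith
  refine ⟨?_, ?_, ?_⟩
  · have e2 : PySem.Int.floordiv ((m / (2^a * 3^b) : Nat) : Int) 2
        = ((m / (2^a * 3^b) / 2 : Nat) : Int) := by
      exact_mod_cast PySem.Int.floordiv_natCast (m / (2^a * 3^b)) 2
    rw [e2, Nat.div_div_eq_div_mul]
    refine (vals_mem_iff _ _).2 ⟨a+1, b, by omega, by omega, ?_⟩
    rw [show ((2:Int)^(a+1) * 3^b) = ((2^(a+1) * 3^b : Nat) : Int) by push_cast; ring,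
      PySem.Int.floordiv_natCast]
    congr 2
    ring
  · have e3 : PySem.Int.floordiv ((m / (2^a * 3^b) : Nat) : Int) 3
        = ((m / (2^a * 3^b) / 3 : Nat) : Int) := by
      exact_mod_cast PySem.Int.floordiv_natCast (m / (2^a * 3^b)) 3
    rw [e3, Nat.div_div_eq_div_mul]
    refine (vals_mem_iff _ _).2 ⟨a, b+1, by omega, by omega, ?_⟩
    rw [show ((2:Int)^a * 3^(b+1)) = ((2^a * 3^(b+1) : Nat) : Int) by push_cast; ring,
      PySem.Int.floordiv_natCast]
    congr 2
    ring
  · have e4 : PySem.Int.floordiv ((m / (2^a * 3^b) : Nat) : Int) 4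
        = ((m / (2^a * 3^b) / 4 : Nat) : Int) := by
      exact_mod_cast PySem.Int.floordiv_natCast (m / (2^a * 3^b)) 4
    rw [e4, Nat.div_div_eq_div_mul]
    refine (vals_mem_iff _ _).2 ⟨a+2, b, by omega, by omega, ?_⟩
    rw [show ((2:Int)^(a+2) * 3^b) = ((2^(a+2) * 3^b : Nat) : Int) by push_cast; ring,
      PySem.Int.floordiv_natCast]
    congr 2
    ring

theorem vals_sorted (coin : Int) : (exchangeVals coin).Pairwise (· < ·) := by
  unfold exchangeVals
  exact PySem.List.sorted_ofList_pairwise_lt _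

theorem foldB_spec : ∀ (l : List Int) (d : PySem.Dict Int Int),
    l.Pairwise (· < ·) → pvInv d →
    (∀ v ∈ l, 12 ≤ v → ∀ k : Int,
      (k = PySem.Int.floordiv v 2 ∨ k = PySem.Int.floordiv v 3 ∨ k = PySem.Int.floordiv v 4) →
      d.get? k = some (pvH k) ∨ (k ∈ l ∧ k < v)) →
    ∀ u : Int, (u ∈ l ∨ d.get? u = some (pvH u)) →
      (l.foldl (fun best v =>
        if v ≤ 11 then best.insert v v
        else best.insert v (max v
          (best.getD (PySem.Int.floordiv v 2) 0 +
           best.getD (PySem.Int.floordiv v 3) 0 +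
           best.getD (PySem.Int.floordiv v 4) 0))) d).get? u = some (pvH u) := by
  intro l
  induction l with
  | nil =>
    intro d _ _ _ u hu
    rcases hu with h | h
    · simp at h
    · simpa using h
  | cons x tl ih =>
    intro d hpw hd hcl u hu
    have hlt : ∀ y ∈ tl, x < y := (List.pairwise_cons.1 hpw).1
    have htl : tl.Pairwise (· < ·) := (List.pairwise_cons.1 hpw).2
    -- the step stores exactly pvH x
    have hstep : (if x ≤ 11 then d.insert x x
        else d.insert x (max x
          (d.getD (PySem.Int.floordiv x 2) 0 +
           d.getD (PySem.Int.floordiv x 3) 0 +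
           d.getD (PySem.Int.floordiv x 4) 0))) = d.insert x (pvH x) := by
      split_ifs with h11
      · rw [pvH_le x h11]
      · have hget : ∀ k : Int,
            (k = PySem.Int.floordiv x 2 ∨ k = PySem.Int.floordiv x 3 ∨ k = PySem.Int.floordiv x 4) →
            d.getD k 0 = pvH k := by
          intro k hk
          rcases hcl x (List.mem_cons_self ..) (by omega) k hk with hsome | ⟨hmem, hklt⟩
          · rw [PySem.Dict.getD_eq_get?_getD, hsome]; rfl
          · rcases List.mem_cons.1 hmem with rfl | hmem'
            · omega
            · exact absurd (hlt _ hmem') (by omega)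
        rw [hget _ (Or.inl rfl), hget _ (Or.inr (Or.inl rfl)), hget _ (Or.inr (Or.inr rfl)),
          ← pvH_gt x h11]
    rw [List.foldl_cons, hstep]
    refine ih (d.insert x (pvH x)) htl (pvInv_insert _ _ hd) ?_ u ?_
    · intro v hv h12 k hk
      rcases hcl v (List.mem_cons_of_mem _ hv) h12 k hk with hsome | ⟨hmem, hklt⟩
      · left
        rw [PySem.Dict.get?_insert]
        split
        · next heq => rw [heq]
        · exact hsome
      · rcases List.mem_cons.1 hmem with rfl | hmem'
        · left; rw [PySem.Dict.get?_insert]; simp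
        · exact Or.inr ⟨hmem', hklt⟩
    · rcases hu with hmem | hsome
      · rcases List.mem_cons.1 hmem with rfl | hmem'
        · right; rw [PySem.Dict.get?_insert]; simp
        · exact Or.inl hmem'
      · right
        rw [PySem.Dict.get?_insert]
        split
        · next heq => rw [heq]
        · exact hsome

-- ===== VERDICT (by name: the statement is the Claim_ definition above) =====
theorem exchange_coin_spec : Claim_equal_exchange_coin := by
  intro coin _
  unfold Spec_exchange_coin exchange_coin exchange_coin_alt
  have hA := (exchangeGoA_spec (coin.toNat + 1) coin (by omega) PySem.Dict.empty pvInv_empty).1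
  by_cases h11 : coin ≤ 11
  · rw [hA, if_pos h11, pvH_le coin h11]
  · rw [hA, if_neg h11]
    show pvH coin = ((exchangeVals coin).foldl (fun best v =>
        if v ≤ 11 then best.insert v v
        else best.insert v (max v
          (best.getD (PySem.Int.floordiv v 2) 0 +
           best.getD (PySem.Int.floordiv v 3) 0 +
           best.getD (PySem.Int.floordiv v 4) 0)))
      PySem.Dict.empty).getD coin 0
    have hfold := foldB_spec (exchangeVals coin) PySem.Dict.empty (vals_sorted coin) pvInv_empty
      ?_ coin (Or.inl (vals_self coin))
    · rw [PySem.Dict.getD_eq_get?_getD, hfold]; rfl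
    · intro v hv h12 k hk
      right
      obtain ⟨m2, m3, m4⟩ := vals_closed coin v (by omega) hv h12
      constructor
      · rcases hk with rfl | rfl | rfl
        · exact m2
        · exact m3
        · exact m4
      · rcases hk with rfl | rfl | rfl <;>
          (rw [PySem.Int.floordiv_eq_ediv_of_pos (by norm_num)]; omega)
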